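-- pv_equiv track=rewrite | github.com/shirruso/digitalHumanities | getOccupations.py | get_character_occupation_by_sentence
-- ===== SOURCE A (Python) =====
-- occupations = ['football player', 'bank manger', 'computer system analyst', 'dr.', 'prof.']
--
-- def is_a_in_x(a, x):
--     for i in range(len(x) - len(a) + 1):
--         if a == x[i:i + len(a)]:
--             return True
--     return False
--
-- def get_character_occupation_by_sentence(sentence):
--     if (sentence is None) or len(sentence) == 0:
--         return None
--     for occupation in occupations:
--         sentence_arr = sentence.lower().split(' ')
--         occupation_arr = occupation.lower().split(' ')
--         if len(sentence_arr) >= len(occupation_arr) and is_a_in_x(occupation_arr, sentence_arr):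
--             return occupation
--     return None
-- ===== SOURCE B (Python) =====
-- occupations = ['football player', 'bank manger', 'computer system analyst', 'dr.', 'prof.']
--
-- def get_character_occupation_by_sentence(sentence):
--     if (sentence is None) or len(sentence) == 0:
--         return None
--     words = sentence.lower().split(' ')
--     ngrams = set()
--     for n in (1, 2, 3):
--         for i in range(len(words) - n + 1):
--             ngrams.add(tuple(words[i:i + n]))
--     for occupation in occupations:
--         if tuple(occupation.lower().split(' ')) in ngrams:
--             return occupation
--     return None
-- ===== Notes on version B (the rewrite author's own statement) =====
-- stated objective: alternative
-- what changed: B tokenizes the sentence once and builds an up-front set of all contiguous 1/2/3-gram tuples, then returns the first occupation whose token tuple is in that index, replacing A's per-occupation re-split and sliding-window rescan.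
import Mathlib
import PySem

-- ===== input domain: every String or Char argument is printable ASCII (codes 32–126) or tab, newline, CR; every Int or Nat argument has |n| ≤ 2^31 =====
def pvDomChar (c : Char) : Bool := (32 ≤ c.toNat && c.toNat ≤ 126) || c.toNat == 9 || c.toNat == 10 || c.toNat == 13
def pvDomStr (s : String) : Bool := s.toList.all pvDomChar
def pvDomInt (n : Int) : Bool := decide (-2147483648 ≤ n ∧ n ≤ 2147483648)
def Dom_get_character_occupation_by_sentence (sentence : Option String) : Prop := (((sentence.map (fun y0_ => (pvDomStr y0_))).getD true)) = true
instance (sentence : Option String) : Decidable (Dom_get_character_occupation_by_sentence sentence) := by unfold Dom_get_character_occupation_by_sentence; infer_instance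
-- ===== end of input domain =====

-- B replaces A's per-occupation re-split plus sliding-window rescan by one up-front set of all
-- contiguous 1/2/3-gram token tuples, then a first-match lookup over the occupations (alternative).

-- ===== PORT A =====
-- s.split(' ') with the non-empty literal separator " ": split? is always `some` here, so getD [] is exact
def pySplitSpace (s : String) : List String := (PySem.Str.split? s " ").getD []

def occupations : List String := ["football player", "bank manger", "computer system analyst", "dr.", "prof."]

def is_a_in_x (a x : List String) : Bool :=
  (PySem.List.pyRange 0 (PySem.List.len x - PySem.List.len a + 1) 1).any
    (fun i => a == PySem.List.slice x (some i) (some (i + PySem.List.len a)))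

def goA (s : String) : List String → Option String
  | [] => none
  | occ :: rest =>
      let sentence_arr := pySplitSpace (PySem.Str.lower s)
      let occupation_arr := pySplitSpace (PySem.Str.lower occ)
      if decide (PySem.List.len occupation_arr ≤ PySem.List.len sentence_arr)
          && is_a_in_x occupation_arr sentence_arr then some occ
      else goA s rest

def get_character_occupation_by_sentence (sentence : Option String) : Option String :=
  match sentence with
  | none => none
  | some s => if PySem.Str.len s = 0 then none else goA s occupations

-- ===== PORT B =====
def ngramSet (words : List String) : PySem.Set (List String) :=
  [(1 : Int), 2, 3].foldl (fun acc n =>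
    (PySem.List.pyRange 0 (PySem.List.len words - n + 1) 1).foldl
      (fun acc2 i => PySem.Set.add acc2 (PySem.List.slice words (some i) (some (i + n)))) acc)
    PySem.Set.empty

def get_character_occupation_by_sentence_alt (sentence : Option String) : Option String :=
  match sentence with
  | none => none
  | some s =>
      if PySem.Str.len s = 0 then none
      else
        let words := pySplitSpace (PySem.Str.lower s)
        let ngrams := ngramSet words
        occupations.find? (fun occ => PySem.Set.contains ngrams (pySplitSpace (PySem.Str.lower occ)))

-- ===== PRECONDITION & SPEC =====
def Spec_get_character_occupation_by_sentence (sentence : Option String) (out : Option String) : Prop := out = get_character_occupation_by_sentence_alt sentence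
instance (sentence : Option String) (out : Option String) : Decidable (Spec_get_character_occupation_by_sentence sentence out) := by unfold Spec_get_character_occupation_by_sentence; infer_instance

-- ===== CLAIM (what is proved, stated in full; the proofs are below) =====
def Claim_equal_get_character_occupation_by_sentence : Prop := ∀ (sentence : Option String), Dom_get_character_occupation_by_sentence sentence → Spec_get_character_occupation_by_sentence sentence (get_character_occupation_by_sentence sentence)

-- ===== LEMMAS AND PROOFS =====

-- membership in the n-gram index: exactly the windows the three inner loops added
theorem mem_ngramSet (words t : List String) :
    t ∈ ngramSet words ↔ ∃ n ∈ ([(1 : Int), 2, 3] : List Int),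
      ∃ i ∈ PySem.List.pyRange 0 (PySem.List.len words - n + 1) 1,
        t = PySem.List.slice words (some i) (some (i + n)) := by
  unfold ngramSet
  simp only [List.foldl_cons, List.foldl_nil]
  rw [PySem.Set.mem_foldl_add, PySem.Set.mem_foldl_add, PySem.Set.mem_foldl_add]
  simp only [PySem.Set.empty, List.not_mem_nil, false_or, List.mem_cons, List.not_mem_nil,
    or_false, exists_eq_or_imp, exists_eq_left]
  rw [or_assoc]

-- a window produced for length n has length exactly n
theorem length_window (words : List String) (n i : Int)
    (hi : i ∈ PySem.List.pyRange 0 (PySem.List.len words - n + 1) 1) (hn : 0 ≤ n) :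
    (PySem.List.slice words (some i) (some (i + n))).length = n.toNat := by
  rw [PySem.List.mem_pyRange_one] at hi
  obtain ⟨h0, h1⟩ := hi
  rw [PySem.List.slice_toNat words h0 (by omega)]
  rw [List.length_take, List.length_drop]
  simp only [PySem.List.len_eq] at h1
  omega

-- the per-occupation condition of A equals B's index lookup, for phrases of length 1, 2 or 3
theorem cond_eq (words t : List String)
    (ht : t.length = 1 ∨ t.length = 2 ∨ t.length = 3) :
    (decide (PySem.List.len t ≤ PySem.List.len words) && is_a_in_x t words)
      = PySem.Set.contains (ngramSet words) t := by
  rw [Bool.eq_iff_iff, PySem.Set.contains_iff, mem_ngramSet]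
  simp only [Bool.and_eq_true, decide_eq_true_eq, is_a_in_x, List.any_eq_true, beq_iff_eq,
    PySem.List.len_eq, List.mem_cons, List.not_mem_nil, or_false, exists_eq_or_imp,
    exists_eq_left]
  constructor
  · rintro ⟨hle, i, hi, ht'⟩
    rcases ht with h | h | h <;> rw [h] at hi ht' <;> push_cast at hi ht'
    · exact Or.inl ⟨i, hi, ht'⟩
    · exact Or.inr (Or.inl ⟨i, hi, ht'⟩)
    · exact Or.inr (Or.inr ⟨i, hi, ht'⟩)
  · rintro (⟨i, hi, ht'⟩ | ⟨i, hi, ht'⟩ | ⟨i, hi, ht'⟩)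
    · have hlen := length_window words 1 i hi (by omega)
      rw [← ht'] at hlen
      have hi' := PySem.List.mem_pyRange_one.mp hi
      refine ⟨by omega, i, ?_, ?_⟩
      · rw [show ((t.length : Int)) = 1 by omega]; exact hi
      · rw [show ((t.length : Int)) = 1 by omega]; exact ht'
    · have hlen := length_window words 2 i hi (by omega)
      rw [← ht'] at hlen
      have hi' := PySem.List.mem_pyRange_one.mp hi
      refine ⟨by omega, i, ?_, ?_⟩
      · rw [show ((t.length : Int)) = 2 by omega]; exact hi
      · rw [show ((t.length : Int)) = 2 by omega]; exact ht'
    · have hlen := length_window words 3 i hi (by omega)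
      rw [← ht'] at hlen
      have hi' := PySem.List.mem_pyRange_one.mp hi
      refine ⟨by omega, i, ?_, ?_⟩
      · rw [show ((t.length : Int)) = 3 by omega]; exact hi
      · rw [show ((t.length : Int)) = 3 by omega]; exact ht'

theorem goA_eq_find (s : String) (l : List String)
    (h : ∀ occ ∈ l, (pySplitSpace (PySem.Str.lower occ)).length = 1 ∨
          (pySplitSpace (PySem.Str.lower occ)).length = 2 ∨
          (pySplitSpace (PySem.Str.lower occ)).length = 3) :
    goA s l = l.find? (fun occ =>
      PySem.Set.contains (ngramSet (pySplitSpace (PySem.Str.lower s)))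
        (pySplitSpace (PySem.Str.lower occ))) := by
  induction l with
  | nil => rfl
  | cons occ rest ih =>
      have hocc := h occ (List.mem_cons_self ..)
      have hrest : ∀ o ∈ rest, (pySplitSpace (PySem.Str.lower o)).length = 1 ∨
          (pySplitSpace (PySem.Str.lower o)).length = 2 ∨
          (pySplitSpace (PySem.Str.lower o)).length = 3 :=
        fun o ho => h o (List.mem_cons_of_mem _ ho)
      rw [goA, List.find?_cons]
      rw [cond_eq _ _ hocc]
      split <;> simp_all [ih hrest]

-- ===== VERDICT (by name: the statement is the Claim_ definition above) =====
theorem get_character_occupation_by_sentence_spec : Claim_equal_get_character_occupation_by_sentence := by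
  intro sentence _
  unfold Spec_get_character_occupation_by_sentence
  cases sentence with
  | none => rfl
  | some s =>
      simp only [get_character_occupation_by_sentence, get_character_occupation_by_sentence_alt]
      split_ifs with h
      · rfl
      · exact goA_eq_find s occupations (by decide)
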